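-- pv_equiv track=rewrite | github.com/wilden30/othello_ai | Othello_GUI.py | isStable
-- ===== SOURCE A (Python) =====
-- def isStable(board, piece, player, direction):
-- 	rowchange = direction[0]
-- 	colchange = direction[1]
-- 	if piece[0]<0 or piece[1]<0 or piece[0]>7 or piece[1]>7:
-- 		return True
-- 	elif board[piece[0]][piece[1]] != player:
-- 		return False
-- 	if board[piece[0]][piece[1]] == player:
-- 		return isStable(board,[piece[0]+rowchange,piece[1]+colchange], player, direction) and isStable(board,[piece[0],piece[1]+colchange], player, direction) and isStable(board,[piece[0]+rowchange,piece[1]], player, direction)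
-- ===== SOURCE B (Python) =====
-- def isStable(board, piece, player, direction):
--     dr, dc = direction[0], direction[1]
--     r, c = piece[0], piece[1]
--     if r < 0 or c < 0 or r > 7 or c > 7:
--         return True
--     rows = range(r, 8, dr) if dr > 0 else range(r, -1, dr) if dr < 0 else [r]
--     cols = range(c, 8, dc) if dc > 0 else range(c, -1, dc) if dc < 0 else [c]
--     return all(board[i][j] == player for i in rows for j in cols)
-- ===== Notes on version B (the rewrite author's own statement) =====
-- stated objective: alternative
-- what changed: Replaces the three-way branching recursion with a direct all()-scan over the rectangular quadrant of board cells reachable in the given direction (a product of two ranges).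
-- outside the precondition, e.g. on isStable([[5, 5], [5, 5]], [0, 0], 5, [-1, -1]): A returns True, B returns True
import Mathlib
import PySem

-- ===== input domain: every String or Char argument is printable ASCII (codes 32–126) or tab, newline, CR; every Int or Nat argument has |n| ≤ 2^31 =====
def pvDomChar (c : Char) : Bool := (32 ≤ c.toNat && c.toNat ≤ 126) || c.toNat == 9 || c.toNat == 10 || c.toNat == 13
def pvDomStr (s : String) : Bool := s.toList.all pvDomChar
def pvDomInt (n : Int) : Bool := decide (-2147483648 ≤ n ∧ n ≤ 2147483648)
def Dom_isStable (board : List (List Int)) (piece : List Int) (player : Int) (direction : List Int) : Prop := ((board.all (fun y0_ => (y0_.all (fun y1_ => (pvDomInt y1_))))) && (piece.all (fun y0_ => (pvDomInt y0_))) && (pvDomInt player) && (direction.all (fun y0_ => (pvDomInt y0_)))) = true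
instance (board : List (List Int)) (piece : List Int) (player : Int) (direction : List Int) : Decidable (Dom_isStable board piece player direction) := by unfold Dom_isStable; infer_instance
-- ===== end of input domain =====

-- B replaces A's three-way branching recursion by a direct scan of the rectangular
-- quadrant of cells reachable in the given direction (objective: alternative).

-- board[i][j]; defaults are only used outside Pre_, where Python raises IndexError
def cellOf (board : List (List Int)) (i j : Int) : Int :=
  PySem.List.pyGetD (PySem.List.pyGetD board i []) j 0

-- ===== PORT A =====
def isStableFuel (board : List (List Int)) (fuel : Nat) (piece : List Int) (player : Int) (direction : List Int) : Bool :=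
  match fuel with
  | 0 => false  -- never reached inside Pre_ (Python would recurse unboundedly only outside Pre_)
  | Nat.succ n =>
    let rowchange := PySem.List.pyGetD direction 0 0
    let colchange := PySem.List.pyGetD direction 1 0
    let p0 := PySem.List.pyGetD piece 0 0
    let p1 := PySem.List.pyGetD piece 1 0
    if p0 < 0 ∨ p1 < 0 ∨ p0 > 7 ∨ p1 > 7 then true
    else if cellOf board p0 p1 ≠ player then false
    else
      isStableFuel board n [p0 + rowchange, p1 + colchange] player direction &&
      isStableFuel board n [p0, p1 + colchange] player direction &&
      isStableFuel board n [p0 + rowchange, p1] player direction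

def isStable (board : List (List Int)) (piece : List Int) (player : Int) (direction : List Int) : Bool :=
  isStableFuel board 64 piece player direction

-- ===== PORT B =====
-- range(r, 8, d) if d > 0 else range(r, -1, d) if d < 0 else [r]
def rowsF (d r : Int) : List Int :=
  if d > 0 then PySem.List.pyRange r 8 d
  else if d < 0 then PySem.List.pyRange r (-1) d
  else [r]

def quadAll (board : List (List Int)) (player : Int) (rows cols : List Int) : Bool :=
  rows.all (fun i => cols.all (fun j => cellOf board i j == player))

def isStable_alt (board : List (List Int)) (piece : List Int) (player : Int) (direction : List Int) : Bool :=
  let dr := PySem.List.pyGetD direction 0 0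
  let dc := PySem.List.pyGetD direction 1 0
  let r := PySem.List.pyGetD piece 0 0
  let c := PySem.List.pyGetD piece 1 0
  if r < 0 ∨ c < 0 ∨ r > 7 ∨ c > 7 then true
  else quadAll board player (rowsF dr r) (rowsF dc c)

-- ===== PRECONDITION & SPEC =====
-- Pre_ excludes inputs where Python A raises: short piece/direction lists (IndexError),
-- zero direction components with the start cell owned by player (unbounded recursion,
-- RecursionError), and boards without the quadrant cells the recursion indexes (IndexError).
-- It requires a full 8x8 board whenever the recursion actually walks (start cell owned by
-- player), which also excludes some inputs on which A returns after the quadrant leaves a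
-- smaller board (see cites).
def Pre_isStable (board : List (List Int)) (piece : List Int) (player : Int) (direction : List Int) : Prop :=
  2 ≤ piece.length ∧ 2 ≤ direction.length ∧
  (let r := PySem.List.pyGetD piece 0 0
   let c := PySem.List.pyGetD piece 1 0
   (r < 0 ∨ c < 0 ∨ r > 7 ∨ c > 7) ∨
   (r < (board.length : Int) ∧ c < ((PySem.List.pyGetD board r []).length : Int) ∧
    cellOf board r c ≠ player) ∨
   ((8 ≤ board.length ∧ ∀ row ∈ board, 8 ≤ row.length) ∧
    PySem.List.pyGetD direction 0 0 ≠ 0 ∧ PySem.List.pyGetD direction 1 0 ≠ 0))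

instance (board : List (List Int)) (piece : List Int) (player : Int) (direction : List Int) : Decidable (Pre_isStable board piece player direction) := by unfold Pre_isStable; infer_instance

def pvWitness_isStable : List (List Int) × List Int × Int × List Int :=
  ([[1,1,1,1,1,1,1,1],[1,1,1,1,1,1,1,1],[1,1,1,1,1,1,1,1],[1,1,1,1,1,1,1,1],
    [1,1,1,1,1,1,1,1],[1,1,1,1,1,1,1,1],[1,1,1,1,1,1,1,1],[1,1,1,1,1,1,1,1]],
   [0, 0], 1, [1, 1])

def Spec_isStable (board : List (List Int)) (piece : List Int) (player : Int) (direction : List Int) (out : Bool) : Prop := out = isStable_alt board piece player direction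
instance (board : List (List Int)) (piece : List Int) (player : Int) (direction : List Int) (out : Bool) : Decidable (Spec_isStable board piece player direction out) := by unfold Spec_isStable; infer_instance

-- ===== CLAIM (what is proved, stated in full; the proofs are below) =====
def Claim_equal_isStable : Prop := ∀ (board : List (List Int)) (piece : List Int) (player : Int) (direction : List Int), Dom_isStable board piece player direction → Pre_isStable board piece player direction → Spec_isStable board piece player direction (isStable board piece player direction)

-- ===== LEMMAS AND PROOFS =====

-- invariant kept by the recursion once it starts on-board, and its termination measure
def invF (d r : Int) : Prop := if 0 < d then 0 ≤ r else r ≤ 7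
def muF (d r : Int) : Nat := if 0 < d then (8 - r).toNat else (r + 1).toNat


theorem pyRange_cons_pos (a b s : Int) (hs : 0 < s) (hab : a < b) :
    PySem.List.pyRange a b s = a :: PySem.List.pyRange (a + s) b s := by
  have hs0 : ¬ (s = 0) := by omega
  unfold PySem.List.pyRange
  rw [if_neg hs0, if_pos hs, if_pos hab, if_neg hs0, if_pos hs]
  have hdiv : (b - a + s - 1) / s = (b - (a + s) + s - 1) / s + 1 := by
    have h : b - a + s - 1 = (b - (a + s) + s - 1) + 1 * s := by ring
    rw [h, Int.add_mul_ediv_right _ _ (by omega)]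
  have hnn : 0 ≤ (b - (a + s) + s - 1) / s := by
    by_cases h : a + s < b
    · exact Int.ediv_nonneg (by omega) (by omega)
    · rw [Int.ediv_eq_zero_of_lt (by omega) (by omega)]
  by_cases h2 : a + s < b
  · rw [if_pos h2]
    have h3 : ((b - a + s - 1) / s).toNat = ((b - (a + s) + s - 1) / s).toNat + 1 := by omega
    rw [h3]
    dsimp only
    rw [List.range_succ_eq_map]
    simp only [List.map_cons, List.map_map]
    refine congrArg₂ List.cons (by push_cast; ring) ?_
    apply List.map_congr_left; intro k _
    simp only [Function.comp_apply]; push_cast; ring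
  · rw [if_neg h2]
    have hz : (b - (a + s) + s - 1) / s = 0 := Int.ediv_eq_zero_of_lt (by omega) (by omega)
    have h3 : ((b - a + s - 1) / s).toNat = 1 := by omega
    rw [h3]
    dsimp only
    simp

theorem pyRange_nil_pos (a b s : Int) (hs : 0 < s) (hab : b ≤ a) :
    PySem.List.pyRange a b s = [] := by
  unfold PySem.List.pyRange
  rw [if_neg (by omega : ¬ (s = 0)), if_pos hs, if_neg (by omega : ¬ (a < b))]
  simp

theorem pyRange_nil_neg (a b s : Int) (hs : s < 0) (hab : a ≤ b) :
    PySem.List.pyRange a b s = [] := by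
  unfold PySem.List.pyRange
  rw [if_neg (by omega : ¬ (s = 0)), if_neg (by omega : ¬ (0 < s)), if_neg (by omega : ¬ (b < a))]
  simp

theorem pyRange_cons_neg (a b s : Int) (hs : s < 0) (hab : b < a) :
    PySem.List.pyRange a b s = a :: PySem.List.pyRange (a + s) b s := by
  have hs0 : ¬ (s = 0) := by omega
  have hns : ¬ (0 < s) := by omega
  unfold PySem.List.pyRange
  rw [if_neg hs0, if_neg hns, if_pos hab, if_neg hs0, if_neg hns]
  have hdiv : (a - b + -s - 1) / -s = (a + s - b + -s - 1) / -s + 1 := by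
    have h : a - b + -s - 1 = (a + s - b + -s - 1) + 1 * -s := by ring
    rw [h, Int.add_mul_ediv_right _ _ (by omega)]
  have hnn : 0 ≤ (a + s - b + -s - 1) / -s := by
    by_cases h : b < a + s
    · exact Int.ediv_nonneg (by omega) (by omega)
    · rw [Int.ediv_eq_zero_of_lt (by omega) (by omega)]
  by_cases h2 : b < a + s
  · rw [if_pos h2]
    have h3 : ((a - b + -s - 1) / -s).toNat = ((a + s - b + -s - 1) / -s).toNat + 1 := by omega
    rw [h3]
    dsimp only
    rw [List.range_succ_eq_map]
    simp only [List.map_cons, List.map_map]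
    refine congrArg₂ List.cons (by push_cast; ring) ?_
    apply List.map_congr_left; intro k _
    simp only [Function.comp_apply]; push_cast; ring
  · rw [if_neg h2]
    have hz : (a + s - b + -s - 1) / -s = 0 := Int.ediv_eq_zero_of_lt (by omega) (by omega)
    have h3 : ((a - b + -s - 1) / -s).toNat = 1 := by omega
    rw [h3]
    dsimp only
    simp

theorem rowsF_cons (d r : Int) (hd : d ≠ 0) (h0 : 0 ≤ r) (h7 : r ≤ 7) :
    rowsF d r = r :: rowsF d (r + d) := by
  unfold rowsF
  by_cases hp : d > 0
  · rw [if_pos hp, if_pos hp]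
    exact pyRange_cons_pos r 8 d hp (by omega)
  · have hn : d < 0 := by omega
    rw [if_neg hp, if_pos hn, if_neg hp, if_pos hn]
    exact pyRange_cons_neg r (-1) d hn (by omega)

theorem rowsF_nil (d r : Int) (hd : d ≠ 0) (hinv : invF d r) (hout : ¬ (0 ≤ r ∧ r ≤ 7)) :
    rowsF d r = [] := by
  unfold rowsF
  unfold invF at hinv
  by_cases hp : d > 0
  · rw [if_pos hp]
    rw [if_pos hp] at hinv
    exact pyRange_nil_pos r 8 d hp (by omega)
  · have hn : d < 0 := by omega
    rw [if_neg hp, if_pos hn]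
    rw [if_neg (by omega : ¬ (0 < d))] at hinv
    exact pyRange_nil_neg r (-1) d hn (by omega)

theorem rowsF_head (d r : Int) (h0 : 0 ≤ r) (h7 : r ≤ 7) :
    ∃ R, rowsF d r = r :: R := by
  by_cases hd : d = 0
  · exact ⟨[], by simp [rowsF, hd]⟩
  · exact ⟨rowsF d (r + d), rowsF_cons d r hd h0 h7⟩

theorem all_and_distrib (xs : List Int) (f g : Int → Bool) :
    xs.all (fun i => f i && g i) = (xs.all f && xs.all g) := by
  induction xs with
  | nil => rfl
  | cons x xs ih =>
    simp only [List.all_cons, ih]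
    cases f x <;> cases g x <;> cases xs.all f <;> cases xs.all g <;> rfl

theorem mu_step (d r : Int) (hd : d ≠ 0) (h0 : 0 ≤ r) (h7 : r ≤ 7) : muF d (r + d) < muF d r := by
  unfold muF
  by_cases hp : 0 < d
  · rw [if_pos hp, if_pos hp]; omega
  · rw [if_neg hp, if_neg hp]; omega

theorem inv_step (d r : Int) (h0 : 0 ≤ r) (h7 : r ≤ 7) : invF d (r + d) := by
  unfold invF
  by_cases hp : 0 < d
  · rw [if_pos hp]; omega
  · rw [if_neg hp]; omega

theorem main_lemma (board : List (List Int)) (player : Int) (direction : List Int)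
    (dr dc : Int) (h0 : PySem.List.pyGetD direction 0 0 = dr)
    (h1 : PySem.List.pyGetD direction 1 0 = dc) (hdr : dr ≠ 0) (hdc : dc ≠ 0) :
    ∀ (fuel : Nat) (r c : Int) (t : List Int), muF dr r + muF dc c < fuel →
      invF dr r → invF dc c →
      isStableFuel board fuel (r :: c :: t) player direction =
        quadAll board player (rowsF dr r) (rowsF dc c) := by
  intro fuel
  induction fuel with
  | zero => intro r c t h _ _; omega
  | succ n ih =>
    intro r c t hμ hr hc
    have e0 : PySem.List.pyGetD (r :: c :: t) 0 0 = r := by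
      simp [PySem.List.pyGetD_zero_cons]
    have e1 : PySem.List.pyGetD (r :: c :: t) 1 0 = c := by
      simp [PySem.List.pyGetD, PySem.List.pyGet?, PySem.List.pyIdx?]
    simp only [isStableFuel, e0, e1, h0, h1]
    by_cases hoff : r < 0 ∨ c < 0 ∨ r > 7 ∨ c > 7
    · rw [if_pos hoff]
      by_cases hrin : 0 ≤ r ∧ r ≤ 7
      · have hcout : ¬ (0 ≤ c ∧ c ≤ 7) := by omega
        rw [rowsF_nil dc c hdc hc hcout]
        simp [quadAll]
      · rw [rowsF_nil dr r hdr hr hrin]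
        simp [quadAll]
    · rw [if_neg hoff]
      have hr0 : 0 ≤ r := by omega
      have hr7 : r ≤ 7 := by omega
      have hc0 : 0 ≤ c := by omega
      have hc7 : c ≤ 7 := by omega
      by_cases hcell : cellOf board r c ≠ player
      · rw [if_pos hcell]
        have hb : (cellOf board r c == player) = false := by
          simpa using hcell
        rw [rowsF_cons dr r hdr hr0 hr7, rowsF_cons dc c hdc hc0 hc7]
        simp [quadAll, hb]
      · rw [if_neg hcell]
        simp only [ne_eq, not_not] at hcell
        have hb : (cellOf board r c == player) = true := by simpa using hcell
        have m1 := mu_step dr r hdr hr0 hr7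
        have m2 := mu_step dc c hdc hc0 hc7
        rw [ih (r + dr) (c + dc) [] (by omega) (inv_step dr r hr0 hr7) (inv_step dc c hc0 hc7),
            ih r (c + dc) [] (by omega) hr (inv_step dc c hc0 hc7),
            ih (r + dr) c [] (by omega) (inv_step dr r hr0 hr7) hc,
            rowsF_cons dr r hdr hr0 hr7, rowsF_cons dc c hdc hc0 hc7]
        simp only [quadAll, List.all_cons, hb, Bool.true_and, all_and_distrib]
        generalize (rowsF dc (c + dc)).all (fun j => cellOf board r j == player) = a
        generalize (rowsF dr (r + dr)).all (fun i => cellOf board i c == player) = x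
        generalize (rowsF dr (r + dr)).all (fun i => (rowsF dc (c + dc)).all (fun j => cellOf board i j == player)) = y
        cases a <;> cases x <;> cases y <;> rfl

-- ===== VERDICT (by name: the statement is the Claim_ definition above) =====
theorem isStable_spec : Claim_equal_isStable := by
  unfold Claim_equal_isStable
  intro board piece player direction hdom hpre
  unfold Spec_isStable
  obtain ⟨hp2, hd2, hrest⟩ := hpre
  match piece, hp2 with
  | p0 :: p1 :: pt, _ =>
  have e0 : PySem.List.pyGetD (p0 :: p1 :: pt) 0 0 = p0 := by
    simp [PySem.List.pyGetD_zero_cons]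
  have e1 : PySem.List.pyGetD (p0 :: p1 :: pt) 1 0 = p1 := by
    simp [PySem.List.pyGetD, PySem.List.pyGet?, PySem.List.pyIdx?]
  simp only [e0, e1] at hrest
  by_cases hoff : p0 < 0 ∨ p1 < 0 ∨ p0 > 7 ∨ p1 > 7
  · show isStableFuel board 64 _ player direction = _
    unfold isStableFuel isStable_alt
    simp only [e0, e1]
    rw [if_pos hoff, if_pos hoff]
  · have h00 : 0 ≤ p0 := by omega
    have h07 : p0 ≤ 7 := by omega
    have h10 : 0 ≤ p1 := by omega
    have h17 : p1 ≤ 7 := by omega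
    unfold isStable isStable_alt
    simp only [e0, e1]
    rw [if_neg hoff]
    rcases hrest with hoff' | ⟨hr', hc', hcell⟩ | ⟨hshape, hdr, hdc⟩
    · omega
    · -- start cell is not the player's: both sides are False
      have hb : (cellOf board p0 p1 == player) = false := by simpa using hcell
      obtain ⟨R, hR⟩ := rowsF_head (PySem.List.pyGetD direction 0 0) p0 h00 h07
      obtain ⟨C, hC⟩ := rowsF_head (PySem.List.pyGetD direction 1 0) p1 h10 h17
      show isStableFuel board 64 _ player direction = _
      unfold isStableFuel
      simp only [e0, e1]
      rw [if_neg hoff, if_pos (by simpa using hcell : cellOf board p0 p1 ≠ player)]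
      rw [hR, hC]
      simp [quadAll, hb]
    · -- general case: the recursion scans the whole quadrant
      have hinvr : invF (PySem.List.pyGetD direction 0 0) p0 := by
        unfold invF; split_ifs <;> omega
      have hinvc : invF (PySem.List.pyGetD direction 1 0) p1 := by
        unfold invF; split_ifs <;> omega
      have hmu : muF (PySem.List.pyGetD direction 0 0) p0 + muF (PySem.List.pyGetD direction 1 0) p1 < 64 := by
        unfold muF; split_ifs <;> omega
      exact main_lemma board player direction _ _ rfl rfl hdr hdc 64 p0 p1 pt hmu hinvr hinvc
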